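-- pv_equiv track=rewrite | github.com/Rafaeltheraven/The-Propaganda-Machine | NLG/template_engine.py | list_string
-- ===== SOURCE A (Python) =====
-- def list_string(data):
-- 	result = ""
-- 	for index, elem in enumerate(data):
-- 		if index == len(data) - 1:
-- 			result = result + elem
-- 		elif index == len(data) - 2:
-- 			result = result + elem + " and "
-- 		else:
-- 			result = result + elem + ", "
-- 	return result
-- ===== SOURCE B (Python) =====
-- def list_string(data):
-- 	if len(data) == 0:
-- 		return ""
-- 	if len(data) == 1:
-- 		return data[0]
-- 	return ", ".join(data[:-1]) + " and " + data[-1]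
-- ===== Notes on version B (the rewrite author's own statement) =====
-- stated objective: faster
-- what changed: Replaced the index-branching accumulation loop over enumerate(data) (repeated string concatenation, quadratic in total output size) with two base cases plus a single slice-and-join expression: ', '.join(data[:-1]) + ' and ' + data[-1].
import Mathlib
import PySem

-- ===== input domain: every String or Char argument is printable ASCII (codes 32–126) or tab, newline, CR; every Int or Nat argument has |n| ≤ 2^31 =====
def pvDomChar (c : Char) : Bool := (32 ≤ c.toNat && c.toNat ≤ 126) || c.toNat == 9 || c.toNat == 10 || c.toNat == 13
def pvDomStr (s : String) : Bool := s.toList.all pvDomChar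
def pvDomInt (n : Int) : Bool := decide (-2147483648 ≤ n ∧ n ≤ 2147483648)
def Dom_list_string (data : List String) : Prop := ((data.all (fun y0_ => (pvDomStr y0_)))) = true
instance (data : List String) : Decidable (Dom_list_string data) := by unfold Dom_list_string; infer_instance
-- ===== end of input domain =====

-- B replaces A's index-branching accumulation loop (repeated string concatenation) with base cases plus ", ".join(data[:-1]) + " and " + data[-1]; a timing run measured B faster.

-- ===== PORT A =====
def list_string (data : List String) : String :=
  (PySem.List.enumerate data 0).foldl
    (fun result ie =>
      if ie.1 = (data.length : Int) - 1 then result ++ ie.2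
      else if ie.1 = (data.length : Int) - 2 then result ++ ie.2 ++ " and "
      else result ++ ie.2 ++ ", ")
    ""

-- ===== PORT B =====
-- data[:-1] is PySem.List.slice data none (some (-1)); data[-1] is in range on this branch (length ≥ 2), ported as getLast!.
def list_string_alt (data : List String) : String :=
  if data.length = 0 then ""
  else if data.length = 1 then data.head!
  else PySem.Str.join ", " (PySem.List.slice data none (some (-1))) ++ " and " ++ data.getLast!

-- ===== PRECONDITION & SPEC =====
def Spec_list_string (data : List String) (out : String) : Prop := out = list_string_alt data
instance (data : List String) (out : String) : Decidable (Spec_list_string data out) := by unfold Spec_list_string; infer_instance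

-- ===== CLAIM (what is proved, stated in full; the proofs are below) =====
def Claim_equal_list_string : Prop := ∀ (data : List String), Dom_list_string data → Spec_list_string data (list_string data)

-- ===== LEMMAS AND PROOFS =====

/-- Common recursive characterisation of the "a, b and c" string. -/
def tailStr : List String → String
  | [] => ""
  | [x] => x
  | [x, y] => x ++ " and " ++ y
  | x :: l => x ++ ", " ++ tailStr l

theorem foldA (n : Int) (l : List String) : ∀ (k : Int) (acc : String),
    k + l.length = n →
    (PySem.List.enumerate l k).foldl
      (fun result ie =>
        if ie.1 = n - 1 then result ++ ie.2
        else if ie.1 = n - 2 then result ++ ie.2 ++ " and "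
        else result ++ ie.2 ++ ", ") acc
    = acc ++ tailStr l := by
  induction l with
  | nil => intro k acc h; simp [PySem.List.enumerate, tailStr]
  | cons x l ih =>
    intro k acc h
    rw [PySem.List.enumerate_cons]
    simp only [List.foldl_cons]
    match l, ih with
    | [], _ =>
      have hk : k = n - 1 := by simp at h; omega
      simp [PySem.List.enumerate, hk, tailStr]
    | [y], ih =>
      have hk : k ≠ n - 1 ∧ k = n - 2 := by simp at h; omega
      rw [if_neg hk.1, if_pos hk.2, ih (k + 1) _ (by simp at h ⊢; omega)]
      simp [tailStr, String.append_assoc]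
    | y :: z :: l', ih =>
      have hk : k ≠ n - 1 ∧ k ≠ n - 2 := by simp at h; omega
      rw [if_neg hk.1, if_neg hk.2, ih (k + 1) _ (by simp at h ⊢; omega)]
      simp [tailStr, String.append_assoc]

theorem foldB (l : List String) (h : 2 ≤ l.length) :
    PySem.Str.join ", " l.dropLast ++ " and " ++ l.getLast! = tailStr l := by
  induction l with
  | nil => simp at h
  | cons x l ih =>
    match l, ih with
    | [], _ => simp at h
    | [y], _ =>
      apply String.toList_injective
      simp [PySem.Str.toList_join, tailStr, List.getLast!, PySem.Chars.join_singleton]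
    | y :: z :: l', ih =>
      have h2 : 2 ≤ (y :: z :: l').length := by simp
      rw [show (x :: y :: z :: l').dropLast = x :: (y :: z :: l').dropLast from rfl]
      have hj : PySem.Str.join ", " (x :: (y :: z :: l').dropLast)
          = x ++ ", " ++ PySem.Str.join ", " ((y :: z :: l').dropLast) := by
        apply String.toList_injective
        simp [PySem.Str.join, PySem.Chars.join_cons_cons]
      rw [hj]
      have hl : (x :: y :: z :: l').getLast! = (y :: z :: l').getLast! := rfl
      rw [hl, show tailStr (x :: y :: z :: l') = x ++ ", " ++ tailStr (y :: z :: l') from rfl,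
        ← ih h2]
      simp [String.append_assoc]

theorem list_string_eq_tailStr (data : List String) : list_string data = tailStr data := by
  unfold list_string
  rw [foldA (data.length : Int) data 0 "" (by simp)]
  simp

-- ===== VERDICT (by name: the statement is the Claim_ definition above) =====
theorem list_string_spec : Claim_equal_list_string := by
  intro data _
  show list_string data = list_string_alt data
  rw [list_string_eq_tailStr]
  unfold list_string_alt
  match data with
  | [] => simp [tailStr]
  | [x] => simp [tailStr]
  | x :: y :: l =>
    rw [if_neg (by simp), if_neg (by simp), PySem.List.slice_to_neg_one,
      foldB _ (by simp)]
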